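-- pv_equiv track=rewrite | github.com/wangzehui20/farmland-instance-segmentation | experiment_farmland/mask_rcnn/1024_256/dataset/preprocess.py | get_clip_list
-- ===== SOURCE A (Python) =====
-- def get_clip_list(width, height, clipw, cliph, overlap):
--     start_w = 0
--     start_h = 0
--     end_w = clipw
--     end_h = cliph
--     clip_list = []
--     while start_h < height:
--         if end_h > height:
--             end_h = height
--         while start_w < width:
--             if end_w > width:
--                 end_w = width
--             clip_list.append([start_h, end_h, start_w, end_w])
--             if end_w == width: break
--             start_w = end_w - overlap
--             end_w = start_w + clipw
--         if end_h == height: break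
--         start_h = end_h - overlap
--         end_h = start_h + cliph
--         start_w = 0
--         end_w = clipw
--     return clip_list
-- ===== SOURCE B (Python) =====
-- def _axis(length, clip, overlap):
--     # 1D intervals: same stepping/clamping as the original, along one axis.
--     res = []
--     start = 0
--     end = clip
--     while start < length:
--         if end > length:
--             end = length
--         res.append((start, end))
--         if end == length:
--             break
--         start = end - overlap
--         end = start + clip
--     return res
--
--
-- def get_clip_list(width, height, clipw, cliph, overlap):
--     hs = _axis(height, cliph, overlap)
--     if not hs:
--         return []
--     ws = _axis(width, clipw, overlap)
--     return [[sh, eh, sw, ew] for (sh, eh) in hs for (sw, ew) in ws]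
-- ===== Notes on version B (the rewrite author's own statement) =====
-- stated objective: simpler
-- what changed: Replaces the interleaved nested while loops with one 1D helper that computes the [start,end] intervals for a single axis, called once per axis, and a product comprehension that assembles the windows.
import Mathlib
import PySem

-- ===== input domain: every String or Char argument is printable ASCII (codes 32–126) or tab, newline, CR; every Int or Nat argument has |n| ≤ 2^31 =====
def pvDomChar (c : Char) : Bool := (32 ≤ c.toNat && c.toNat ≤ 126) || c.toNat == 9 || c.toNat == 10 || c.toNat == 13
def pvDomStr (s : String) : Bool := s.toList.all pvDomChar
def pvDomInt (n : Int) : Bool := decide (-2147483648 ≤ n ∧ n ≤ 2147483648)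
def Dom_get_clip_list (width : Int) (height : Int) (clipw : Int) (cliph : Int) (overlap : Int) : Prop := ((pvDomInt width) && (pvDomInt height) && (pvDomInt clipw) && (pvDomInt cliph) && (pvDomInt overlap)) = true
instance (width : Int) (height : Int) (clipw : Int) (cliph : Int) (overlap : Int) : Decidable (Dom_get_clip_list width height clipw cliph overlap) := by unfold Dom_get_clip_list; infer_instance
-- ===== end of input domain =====

-- B computes the 1D [start,end] intervals of each axis once with a shared helper and
-- assembles the windows with a product comprehension, instead of A's interleaved nested whiles.
-- Fuel (pvFuel) is a pure totality guard for the while loops: on every input on which the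
-- Python loops terminate (within Dom_) they stop long before the fuel runs out, and when the
-- Python stepping makes no progress (overlap >= clip on a too-short axis) both ports are
-- truncated by the same fuel, so the ports agree on all of Dom_.

def pvFuel : Nat := 2147483650

-- ===== PORT A =====
-- inner `while start_w < width` loop of A
def pvInnerA (width clipw overlap sh eh : Int) : Nat → Int → Int → List (List Int) → List (List Int)
  | 0, _, _, acc => acc
  | fuel + 1, sw, ew, acc =>
    if sw < width then
      let ew := if ew > width then width else ew
      let acc := acc ++ [[sh, eh, sw, ew]]
      if ew == width then acc
      else pvInnerA width clipw overlap sh eh fuel (ew - overlap) ((ew - overlap) + clipw) acc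
    else acc

-- outer `while start_h < height` loop of A
def pvOuterA (width height clipw cliph overlap : Int) : Nat → Int → Int → Int → Int → List (List Int) → List (List Int)
  | 0, _, _, _, _, acc => acc
  | fuel + 1, sh, eh, sw, ew, acc =>
    if sh < height then
      let eh := if eh > height then height else eh
      let acc := pvInnerA width clipw overlap sh eh pvFuel sw ew acc
      if eh == height then acc
      else pvOuterA width height clipw cliph overlap fuel (eh - overlap) ((eh - overlap) + cliph) 0 clipw acc
    else acc

def get_clip_list (width : Int) (height : Int) (clipw : Int) (cliph : Int) (overlap : Int) : List (List Int) :=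
  pvOuterA width height clipw cliph overlap pvFuel 0 cliph 0 clipw []

-- ===== PORT B =====
-- B's `_axis` helper: the 1D intervals along one axis
def pvAxisB (length clip overlap : Int) : Nat → Int → Int → List (Int × Int) → List (Int × Int)
  | 0, _, _, res => res
  | fuel + 1, start, stop, res =>
    if start < length then
      let stop := if stop > length then length else stop
      let res := res ++ [(start, stop)]
      if stop == length then res
      else pvAxisB length clip overlap fuel (stop - overlap) ((stop - overlap) + clip) res
    else res

def get_clip_list_alt (width : Int) (height : Int) (clipw : Int) (cliph : Int) (overlap : Int) : List (List Int) :=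
  let hs := pvAxisB height cliph overlap pvFuel 0 cliph []
  if hs.isEmpty then []
  else
    let ws := pvAxisB width clipw overlap pvFuel 0 clipw []
    hs.flatMap (fun p => ws.map (fun q => [p.1, p.2, q.1, q.2]))

-- ===== PRECONDITION & SPEC =====
def Spec_get_clip_list (width : Int) (height : Int) (clipw : Int) (cliph : Int) (overlap : Int) (out : List (List Int)) : Prop := out = get_clip_list_alt width height clipw cliph overlap
instance (width : Int) (height : Int) (clipw : Int) (cliph : Int) (overlap : Int) (out : List (List Int)) : Decidable (Spec_get_clip_list width height clipw cliph overlap out) := by unfold Spec_get_clip_list; infer_instance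

-- ===== CLAIM (what is proved, stated in full; the proofs are below) =====
def Claim_equal_get_clip_list : Prop := ∀ (width : Int) (height : Int) (clipw : Int) (cliph : Int) (overlap : Int), Dom_get_clip_list width height clipw cliph overlap → Spec_get_clip_list width height clipw cliph overlap (get_clip_list width height clipw cliph overlap)

-- ===== LEMMAS AND PROOFS =====

theorem pvAxisB_acc (length clip overlap : Int) :
    ∀ (fuel : Nat) (s e : Int) (res : List (Int × Int)),
      pvAxisB length clip overlap fuel s e res = res ++ pvAxisB length clip overlap fuel s e [] := by
  intro fuel
  induction fuel with
  | zero => intro s e res; simp [pvAxisB]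
  | succ n ih =>
    intro s e res
    simp only [pvAxisB]
    split_ifs with h1 h2 h3 h4
    · simp
    · simp at h3
    · simp
    · rw [ih]
      conv_rhs => rw [ih]
      simp
    · simp

theorem pvInnerA_eq (width clipw overlap sh eh : Int) :
    ∀ (fuel : Nat) (sw ew : Int) (acc : List (List Int)),
      pvInnerA width clipw overlap sh eh fuel sw ew acc
        = acc ++ (pvAxisB width clipw overlap fuel sw ew []).map (fun q => [sh, eh, q.1, q.2]) := by
  intro fuel
  induction fuel with
  | zero => intro sw ew acc; simp [pvInnerA, pvAxisB]
  | succ n ih =>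
    intro sw ew acc
    simp only [pvInnerA, pvAxisB]
    split_ifs with h1 h2 h3 h4
    · simp
    · simp at h3
    · simp
    · rw [ih]
      conv_rhs => rw [pvAxisB_acc]
      simp
    · simp

theorem pvOuterA_eq (width height clipw cliph overlap : Int) :
    ∀ (fuel : Nat) (sh eh : Int) (acc : List (List Int)),
      pvOuterA width height clipw cliph overlap fuel sh eh 0 clipw acc
        = acc ++ (pvAxisB height cliph overlap fuel sh eh []).flatMap
            (fun p => (pvAxisB width clipw overlap pvFuel 0 clipw []).map
              (fun q => [p.1, p.2, q.1, q.2])) := by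
  intro fuel
  induction fuel with
  | zero => intro sh eh acc; simp [pvOuterA, pvAxisB]
  | succ n ih =>
    intro sh eh acc
    simp only [pvOuterA, pvAxisB]
    split_ifs with h1 h2 h3 h4
    · rw [pvInnerA_eq]; simp
    · simp at h3
    · rw [pvInnerA_eq]; simp
    · rw [pvInnerA_eq, ih,
        pvAxisB_acc height cliph overlap n (eh - overlap) (eh - overlap + cliph) ([] ++ [(sh, eh)])]
      simp
    · simp

-- ===== VERDICT (by name: the statement is the Claim_ definition above) =====
theorem get_clip_list_spec : Claim_equal_get_clip_list := by
  intro width height clipw cliph overlap _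
  unfold Spec_get_clip_list get_clip_list get_clip_list_alt
  rw [pvOuterA_eq]
  by_cases hh : pvAxisB height cliph overlap pvFuel 0 cliph [] = []
  · simp [hh]
  · simp [hh]
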